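-- pv_equiv track=rewrite | github.com/Markyriott/collegestuff | CodePath/TIP102/Unit2/Session2/AdvancedA/p1.py | find_balanced_subsequence
-- ===== SOURCE A (Python) =====
-- def find_balanced_subsequence(art_pieces):
--     freq = {}
--
--     for piece in art_pieces:
--         freq[piece] = freq.get(piece, 0) + 1
--
--     max_length = 0
--
--     for k in freq:
--         if k + 1 in freq:
--             max_length = max(max_length, freq[k] + freq[k + 1])
--
--     return max_length
-- ===== SOURCE B (Python) =====
-- def find_balanced_subsequence(art_pieces):
--     counts = {}
--     for piece in art_pieces:
--         counts[piece] = counts.get(piece, 0) + 1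
--     vals = sorted(counts)
--     best = 0
--     for lo, hi in zip(vals, vals[1:]):
--         if hi - lo == 1:
--             best = max(best, counts[lo] + counts[hi])
--     return best
-- ===== Notes on version B (the rewrite author's own statement) =====
-- stated objective: alternative
-- what changed: B replaces A's hash probe for k+1 over every dict key by sorting the distinct values once and scanning consecutive sorted neighbours for a difference of exactly 1.
import Mathlib
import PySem

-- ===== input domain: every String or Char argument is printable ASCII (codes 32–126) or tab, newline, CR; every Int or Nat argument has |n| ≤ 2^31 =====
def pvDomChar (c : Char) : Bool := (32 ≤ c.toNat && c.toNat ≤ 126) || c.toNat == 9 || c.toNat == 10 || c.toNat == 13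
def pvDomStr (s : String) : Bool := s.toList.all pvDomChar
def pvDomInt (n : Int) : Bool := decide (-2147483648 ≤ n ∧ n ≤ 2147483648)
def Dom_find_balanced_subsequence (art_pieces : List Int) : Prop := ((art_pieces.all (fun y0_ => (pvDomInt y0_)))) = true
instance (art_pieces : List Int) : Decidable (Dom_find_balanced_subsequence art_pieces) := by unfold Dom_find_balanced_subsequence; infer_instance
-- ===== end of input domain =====

-- B sorts the distinct values once and scans consecutive sorted neighbours for a gap of 1,
-- instead of A's hash probe for k+1 at every key (alternative decomposition; same results).

-- ===== PORT A =====
def find_balanced_subsequence (art_pieces : List Int) : Int :=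
  let freq := art_pieces.foldl (fun d p => d.insert p (d.getD p (0:Int) + 1)) (PySem.Dict.empty : PySem.Dict Int Int)
  -- freq[k] / freq[k+1]: both keys are present when read, so getD is exact here
  freq.keys.foldl (fun max_length k =>
    if freq.contains (k + 1) then max max_length (freq.getD k 0 + freq.getD (k + 1) 0)
    else max_length) 0

-- ===== PORT B =====
def find_balanced_subsequence_alt (art_pieces : List Int) : Int :=
  let counts := art_pieces.foldl (fun d p => d.insert p (d.getD p (0:Int) + 1)) (PySem.Dict.empty : PySem.Dict Int Int)
  let vals := PySem.List.sorted counts.keys (fun x => x) false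
  -- counts[lo] / counts[hi]: lo, hi are keys, so getD is exact here
  (vals.zip (PySem.List.slice vals (some 1) none)).foldl (fun best p =>
    if p.2 - p.1 = 1 then max best (counts.getD p.1 0 + counts.getD p.2 0)
    else best) 0

-- ===== PRECONDITION & SPEC =====
def Spec_find_balanced_subsequence (art_pieces : List Int) (out : Int) : Prop := out = find_balanced_subsequence_alt art_pieces
instance (art_pieces : List Int) (out : Int) : Decidable (Spec_find_balanced_subsequence art_pieces out) := by unfold Spec_find_balanced_subsequence; infer_instance

-- ===== CLAIM (what is proved, stated in full; the proofs are below) =====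
def Claim_equal_find_balanced_subsequence : Prop := ∀ (art_pieces : List Int), Dom_find_balanced_subsequence art_pieces → Spec_find_balanced_subsequence art_pieces (find_balanced_subsequence art_pieces)

-- ===== LEMMAS AND PROOFS =====

-- A's loop body, with the dict abstracted to membership in K and a count function c
def pvBodyA (K : List Int) (c : Int → Int) (m k : Int) : Int :=
  if (k + 1) ∈ K then max m (c k + c (k + 1)) else m

def pvBodyB (c : Int → Int) (m : Int) (p : Int × Int) : Int :=
  if p.2 - p.1 = 1 then max m (c p.1 + c p.2) else m

-- pvBodyA is right-commutative, so the fold is permutation-invariant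
lemma pvBodyA_rcomm (K : List Int) (c : Int → Int) (m a b : Int) :
    pvBodyA K c (pvBodyA K c m a) b = pvBodyA K c (pvBodyA K c m b) a := by
  unfold pvBodyA
  split_ifs <;> simp [max_right_comm]

-- the zipped adjacent scan over a strictly sorted list equals the membership-probing fold,
-- provided successors present in K are present in the list itself
lemma pvZipScan (K : List Int) (c : Int → Int) :
    ∀ (l : List Int) (acc : Int), l.Pairwise (· < ·) →
      (∀ x ∈ l, ((x + 1) ∈ K ↔ (x + 1) ∈ l)) →
      l.foldl (pvBodyA K c) acc = (l.zip (l.drop 1)).foldl (pvBodyB c) acc := by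
  intro l
  induction l with
  | nil => intro acc _ _; rfl
  | cons k t ih =>
    intro acc hp hm
    cases t with
    | nil =>
      simp only [List.foldl, List.drop, List.zip_nil_right, List.foldl_nil]
      have h1 : ¬ ((k + 1) ∈ [k]) := by simp
      have : ¬ ((k + 1) ∈ (K : List Int)) := fun h => h1 ((hm k (by simp)).mp h)
      simp [pvBodyA, this]
    | cons hi rest =>
      have hklt : k < hi := (List.pairwise_cons.mp hp).1 hi (by simp)
      have hrest : ∀ y ∈ rest, hi < y := by
        have := (List.pairwise_cons.mp (List.pairwise_cons.mp hp).2).1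
        exact this
      -- head condition: k+1 ∈ K ↔ hi = k+1 ↔ hi - k = 1
      have hcond : ((k + 1) ∈ K) ↔ hi - k = 1 := by
        rw [hm k (by simp)]
        simp only [List.mem_cons]
        constructor
        · rintro (h | h | h)
          · omega
          · omega
          · have := hrest _ h; omega
        · intro h; right; left; omega
      have hstep : pvBodyA K c acc k = pvBodyB c acc (k, hi) := by
        unfold pvBodyA pvBodyB
        by_cases h : hi - k = 1
        · rw [if_pos (hcond.mpr h), if_pos h]
          have : hi = k + 1 := by omega
          simp [this]
        · rw [if_neg (fun hh => h (hcond.mp hh)), if_neg h]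
      have hm' : ∀ x ∈ hi :: rest, ((x + 1) ∈ K ↔ (x + 1) ∈ hi :: rest) := by
        intro x hx
        have hxgt : k < x := by
          rcases List.mem_cons.mp hx with h | h
          · omega
          · have := hrest _ h; omega
        rw [hm x (by simp [hx])]
        simp only [List.mem_cons]
        constructor
        · rintro (h | h)
          · omega
          · exact h
        · intro h; right; exact h
      have hp' : (hi :: rest).Pairwise (· < ·) := (List.pairwise_cons.mp hp).2
      calc (k :: hi :: rest).foldl (pvBodyA K c) acc
          = (hi :: rest).foldl (pvBodyA K c) (pvBodyA K c acc k) := rfl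
        _ = ((hi :: rest).zip ((hi :: rest).drop 1)).foldl (pvBodyB c) (pvBodyA K c acc k) :=
            ih _ hp' hm'
        _ = ((k :: hi :: rest).zip ((k :: hi :: rest).drop 1)).foldl (pvBodyB c) acc := by
            simp only [List.drop, List.zip_cons_cons, List.foldl_cons, hstep]

theorem find_balanced_subsequence_equal (art_pieces : List Int) :
    find_balanced_subsequence art_pieces = find_balanced_subsequence_alt art_pieces := by
  unfold find_balanced_subsequence find_balanced_subsequence_alt
  rw [PySem.Dict.foldl_insert_getD_add_one_eq_counter]
  dsimp only
  set c := fun v => ((art_pieces.count v : Int)) with hc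
  set K := PySem.Set.ofList art_pieces with hK
  set S := PySem.List.sorted K (fun x => x) false with hS
  have hkeys : (PySem.Dict.counter art_pieces).keys = K := by
    rw [PySem.Dict.keys_counter]
  have hA : (fun (max_length k : Int) =>
        if (PySem.Dict.counter art_pieces).contains (k + 1) = true then
          max max_length ((PySem.Dict.counter art_pieces).getD k 0 +
            (PySem.Dict.counter art_pieces).getD (k + 1) 0)
        else max_length) = pvBodyA K c := by
    funext m k
    unfold pvBodyA
    rw [PySem.Dict.contains_counter, PySem.Dict.getD_counter, PySem.Dict.getD_counter]
    simp [hc, hK, PySem.Set.mem_ofList]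
  have hB : (fun (best : Int) (p : Int × Int) =>
        if p.2 - p.1 = 1 then
          max best ((PySem.Dict.counter art_pieces).getD p.1 0 +
            (PySem.Dict.counter art_pieces).getD p.2 0)
        else best) = pvBodyB c := by
    funext m p
    unfold pvBodyB
    rw [PySem.Dict.getD_counter, PySem.Dict.getD_counter]
  have hslice : PySem.List.slice S (some 1) none = S.drop 1 := by
    simpa using PySem.List.slice_from_natCast (xs := S) (a := 1)
  rw [hkeys, hA, hB, hslice]
  have hperm : S.Perm K := PySem.List.sorted_perm _ _ _
  have h1 : K.foldl (pvBodyA K c) 0 = S.foldl (pvBodyA K c) 0 :=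
    hperm.symm.foldl_eq' (fun x _ y _ z => pvBodyA_rcomm K c z x y) 0
  rw [h1]
  apply pvZipScan
  · rw [hS, hK]; exact PySem.List.sorted_ofList_pairwise_lt art_pieces
  · intro x _
    rw [hS]
    exact (PySem.List.mem_sorted _ _ _ _).symm

-- ===== VERDICT (by name: the statement is the Claim_ definition above) =====
theorem find_balanced_subsequence_spec : Claim_equal_find_balanced_subsequence := by
  intro art_pieces _
  unfold Spec_find_balanced_subsequence
  exact find_balanced_subsequence_equal art_pieces
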